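-- pv_equiv track=rewrite | github.com/IamLena/experiment_planing | lab02/main.py | calculate
-- ===== SOURCE A (Python) =====
-- def calculate(koefs):
-- 	table = []
-- 	for i in range (8):
-- 		tablerow = []
-- 		if (i & 0b00000001 == 0b00000001):
-- 			sigma2 = 1
-- 		else:
-- 			sigma2 = -1
-- 		if (i & 0b00000010 == 0b00000010):
-- 			m2 = 1
-- 		else:
-- 			m2 = -1
-- 		if (i & 0b00000100 == 0b00000100):
-- 			m1 = 1
-- 		else:
-- 			m1 = -1
-- 		tablerow.append(m1)
-- 		tablerow.append(m2)
-- 		tablerow.append(sigma2)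
-- 		table.append(tablerow)
-- 	y_hat = []
-- 	N = len(table)
-- 	for i in range (N):
-- 		y_hat_value = koefs[0] + koefs[1]*table[i][0] + koefs[2]*table[i][1] + koefs[3]*table[i][2] + koefs[4]*table[i][0]*table[i][1] + koefs[5]*table[i][0]*table[i][2] + koefs[6]*table[i][1]*table[i][2]
-- 		y_hat.append(y_hat_value)
-- 	return y_hat
-- ===== SOURCE B (Python) =====
-- def calculate(koefs):
--     # Fast sign-transform (Walsh-Hadamard butterfly): arrange the 7 coefficients on the
--     # monomial basis indexed by bits (bit0=sigma2, bit1=m2, bit2=m1), then recursively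
--     # specialize the top variable to -1 / +1, halving the coefficient vector each time.
--     def eval_all(c):
--         if len(c) < 2:
--             return c
--         h = len(c) // 2
--         lo, hi = c[:h], c[h:]
--         minus = [a - b for a, b in zip(lo, hi)]
--         plus = [a + b for a, b in zip(lo, hi)]
--         return eval_all(minus) + eval_all(plus)
--     c = [koefs[0], koefs[3], koefs[2], koefs[6], koefs[1], koefs[5], koefs[4], 0]
--     return eval_all(c)
-- ===== Notes on version B (the rewrite author's own statement) =====
-- stated objective: alternative
-- what changed: Replaces A's bit-mask table construction plus per-row polynomial evaluation with a fast Walsh-Hadamard-style butterfly: the coefficients are laid out on the monomial basis and a divide-and-conquer pass recursively specializes each sign variable to -1/+1, halving the coefficient vector, so no sign table and no per-row polynomial exist.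
import Mathlib
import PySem

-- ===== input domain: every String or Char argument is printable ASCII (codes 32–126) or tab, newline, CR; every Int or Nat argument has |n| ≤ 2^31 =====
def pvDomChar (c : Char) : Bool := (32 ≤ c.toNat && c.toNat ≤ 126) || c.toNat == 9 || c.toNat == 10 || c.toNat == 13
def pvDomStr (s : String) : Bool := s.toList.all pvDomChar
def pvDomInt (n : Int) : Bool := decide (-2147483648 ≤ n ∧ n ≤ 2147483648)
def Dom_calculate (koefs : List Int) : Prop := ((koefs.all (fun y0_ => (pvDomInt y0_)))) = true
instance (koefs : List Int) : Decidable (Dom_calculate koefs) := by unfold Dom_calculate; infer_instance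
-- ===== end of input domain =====

-- B replaces A's sign-table + per-row polynomial with a Walsh-Hadamard butterfly (objective: alternative, multiplication-free).
-- ===== PORT A =====
-- literal port of A: builds the 8-row sign table from the bit masks, then an indexed loop over it
def calculate (koefs : List Int) : List Int :=
  let table : List (List Int) :=
    (PySem.List.pyRange 0 8 1).foldl (fun table i =>
      let tablerow : List Int := []
      let sigma2 : Int := if PySem.Int.band i 1 == 1 then 1 else -1
      let m2 : Int := if PySem.Int.band i 2 == 2 then 1 else -1
      let m1 : Int := if PySem.Int.band i 4 == 4 then 1 else -1
      let tablerow := tablerow ++ [m1]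
      let tablerow := tablerow ++ [m2]
      let tablerow := tablerow ++ [sigma2]
      table ++ [tablerow]) []
  let N : Int := table.length
  (PySem.List.pyRange 0 N 1).foldl (fun y_hat i =>
    let row := PySem.List.pyGetD table i []
    let v := PySem.List.pyGetD koefs 0 0
      + PySem.List.pyGetD koefs 1 0 * PySem.List.pyGetD row 0 0
      + PySem.List.pyGetD koefs 2 0 * PySem.List.pyGetD row 1 0
      + PySem.List.pyGetD koefs 3 0 * PySem.List.pyGetD row 2 0
      + PySem.List.pyGetD koefs 4 0 * PySem.List.pyGetD row 0 0 * PySem.List.pyGetD row 1 0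
      + PySem.List.pyGetD koefs 5 0 * PySem.List.pyGetD row 0 0 * PySem.List.pyGetD row 2 0
      + PySem.List.pyGetD koefs 6 0 * PySem.List.pyGetD row 1 0 * PySem.List.pyGetD row 2 0
    y_hat ++ [v]) []

-- ===== PORT B =====
-- recursive butterfly: specialize the top variable to -1 / +1, halving the coefficient vector
-- (c[:h]/c[h:] with h = len//2 ≥ 0 ported as take/drop, exact for nonnegative slice bounds)
def evalAllGo : Nat → List Int → List Int
  | 0, c => c
  | fuel+1, c =>
    if c.length < 2 then c
    else
      let h := c.length / 2
      let lo := c.take h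
      let hi := c.drop h
      let minus := (lo.zip hi).map (fun p => p.1 - p.2)
      let plus := (lo.zip hi).map (fun p => p.1 + p.2)
      evalAllGo fuel minus ++ evalAllGo fuel plus

def evalAll (c : List Int) : List Int := evalAllGo c.length c

-- port of B: coefficients on the monomial basis (bit0=sigma2, bit1=m2, bit2=m1), then the butterfly
def calculate_alt (koefs : List Int) : List Int :=
  let c : List Int := [PySem.List.pyGetD koefs 0 0, PySem.List.pyGetD koefs 3 0,
    PySem.List.pyGetD koefs 2 0, PySem.List.pyGetD koefs 6 0,
    PySem.List.pyGetD koefs 1 0, PySem.List.pyGetD koefs 5 0,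
    PySem.List.pyGetD koefs 4 0, 0]
  evalAll c

-- ===== PRECONDITION & SPEC =====
-- A (and B) raise IndexError when koefs has fewer than 7 elements; Pre_ excludes exactly those.
def Pre_calculate (koefs : List Int) : Prop := 7 <= koefs.length
instance (koefs : List Int) : Decidable (Pre_calculate koefs) := by unfold Pre_calculate; infer_instance
def pvWitness_calculate : List Int := [1, 2, 3, 4, 5, 6, 7]
def Spec_calculate (koefs : List Int) (out : List Int) : Prop := out = calculate_alt koefs
instance (koefs : List Int) (out : List Int) : Decidable (Spec_calculate koefs out) := by unfold Spec_calculate; infer_instance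

-- ===== CLAIM (what is proved, stated in full; the proofs are below) =====
def Claim_equal_calculate : Prop := ∀ (koefs : List Int), Dom_calculate koefs → Pre_calculate koefs → Spec_calculate koefs (calculate koefs)

-- ===== LEMMAS AND PROOFS =====
-- evalAll unfolded on an explicit 8-element list
theorem evalAll_eight (a b c d e f g h : Int) :
    evalAll [a, b, c, d, e, f, g, h] =
      [a-e-(c-g)-(b-f-(d-h)), a-e-(c-g)+(b-f-(d-h)),
       a-e+(c-g)-(b-f+(d-h)), a-e+(c-g)+(b-f+(d-h)),
       a+e-(c+g)-(b+f-(d+h)), a+e-(c+g)+(b+f-(d+h)),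
       a+e+(c+g)-(b+f+(d+h)), a+e+(c+g)+(b+f+(d+h))] := by
  simp [evalAll, evalAllGo]

-- A's first loop builds a koefs-independent table: evaluate it once by kernel computation
theorem table_eval :
    (PySem.List.pyRange 0 8 1).foldl (fun table i =>
      let tablerow : List Int := []
      let sigma2 : Int := if PySem.Int.band i 1 == 1 then 1 else -1
      let m2 : Int := if PySem.Int.band i 2 == 2 then 1 else -1
      let m1 : Int := if PySem.Int.band i 4 == 4 then 1 else -1
      let tablerow := tablerow ++ [m1]
      let tablerow := tablerow ++ [m2]
      let tablerow := tablerow ++ [sigma2]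
      table ++ [tablerow]) ([] : List (List Int)) =
    [[-1,-1,-1],[-1,-1,1],[-1,1,-1],[-1,1,1],[1,-1,-1],[1,-1,1],[1,1,-1],[1,1,1]] := by
  decide

theorem rowL0 : PySem.List.pyGetD ([[-1,-1,-1],[-1,-1,1],[-1,1,-1],[-1,1,1],[1,-1,-1],[1,-1,1],[1,1,-1],[1,1,1]] : List (List Int)) 0 [] = [-1, -1, -1] := by decide
theorem rowL1 : PySem.List.pyGetD ([[-1,-1,-1],[-1,-1,1],[-1,1,-1],[-1,1,1],[1,-1,-1],[1,-1,1],[1,1,-1],[1,1,1]] : List (List Int)) 1 [] = [-1, -1, 1] := by decide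
theorem rowL2 : PySem.List.pyGetD ([[-1,-1,-1],[-1,-1,1],[-1,1,-1],[-1,1,1],[1,-1,-1],[1,-1,1],[1,1,-1],[1,1,1]] : List (List Int)) 2 [] = [-1, 1, -1] := by decide
theorem rowL3 : PySem.List.pyGetD ([[-1,-1,-1],[-1,-1,1],[-1,1,-1],[-1,1,1],[1,-1,-1],[1,-1,1],[1,1,-1],[1,1,1]] : List (List Int)) 3 [] = [-1, 1, 1] := by decide
theorem rowL4 : PySem.List.pyGetD ([[-1,-1,-1],[-1,-1,1],[-1,1,-1],[-1,1,1],[1,-1,-1],[1,-1,1],[1,1,-1],[1,1,1]] : List (List Int)) 4 [] = [1, -1, -1] := by decide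
theorem rowL5 : PySem.List.pyGetD ([[-1,-1,-1],[-1,-1,1],[-1,1,-1],[-1,1,1],[1,-1,-1],[1,-1,1],[1,1,-1],[1,1,1]] : List (List Int)) 5 [] = [1, -1, 1] := by decide
theorem rowL6 : PySem.List.pyGetD ([[-1,-1,-1],[-1,-1,1],[-1,1,-1],[-1,1,1],[1,-1,-1],[1,-1,1],[1,1,-1],[1,1,1]] : List (List Int)) 6 [] = [1, 1, -1] := by decide
theorem rowL7 : PySem.List.pyGetD ([[-1,-1,-1],[-1,-1,1],[-1,1,-1],[-1,1,1],[1,-1,-1],[1,-1,1],[1,1,-1],[1,1,1]] : List (List Int)) 7 [] = [1, 1, 1] := by decide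
theorem cell_mmm_0 : PySem.List.pyGetD ([-1, -1, -1] : List Int) 0 0 = -1 := by decide
theorem cell_mmm_1 : PySem.List.pyGetD ([-1, -1, -1] : List Int) 1 0 = -1 := by decide
theorem cell_mmm_2 : PySem.List.pyGetD ([-1, -1, -1] : List Int) 2 0 = -1 := by decide
theorem cell_mmp_0 : PySem.List.pyGetD ([-1, -1, 1] : List Int) 0 0 = -1 := by decide
theorem cell_mmp_1 : PySem.List.pyGetD ([-1, -1, 1] : List Int) 1 0 = -1 := by decide
theorem cell_mmp_2 : PySem.List.pyGetD ([-1, -1, 1] : List Int) 2 0 = 1 := by decide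
theorem cell_mpm_0 : PySem.List.pyGetD ([-1, 1, -1] : List Int) 0 0 = -1 := by decide
theorem cell_mpm_1 : PySem.List.pyGetD ([-1, 1, -1] : List Int) 1 0 = 1 := by decide
theorem cell_mpm_2 : PySem.List.pyGetD ([-1, 1, -1] : List Int) 2 0 = -1 := by decide
theorem cell_mpp_0 : PySem.List.pyGetD ([-1, 1, 1] : List Int) 0 0 = -1 := by decide
theorem cell_mpp_1 : PySem.List.pyGetD ([-1, 1, 1] : List Int) 1 0 = 1 := by decide
theorem cell_mpp_2 : PySem.List.pyGetD ([-1, 1, 1] : List Int) 2 0 = 1 := by decide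
theorem cell_pmm_0 : PySem.List.pyGetD ([1, -1, -1] : List Int) 0 0 = 1 := by decide
theorem cell_pmm_1 : PySem.List.pyGetD ([1, -1, -1] : List Int) 1 0 = -1 := by decide
theorem cell_pmm_2 : PySem.List.pyGetD ([1, -1, -1] : List Int) 2 0 = -1 := by decide
theorem cell_pmp_0 : PySem.List.pyGetD ([1, -1, 1] : List Int) 0 0 = 1 := by decide
theorem cell_pmp_1 : PySem.List.pyGetD ([1, -1, 1] : List Int) 1 0 = -1 := by decide
theorem cell_pmp_2 : PySem.List.pyGetD ([1, -1, 1] : List Int) 2 0 = 1 := by decide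
theorem cell_ppm_0 : PySem.List.pyGetD ([1, 1, -1] : List Int) 0 0 = 1 := by decide
theorem cell_ppm_1 : PySem.List.pyGetD ([1, 1, -1] : List Int) 1 0 = 1 := by decide
theorem cell_ppm_2 : PySem.List.pyGetD ([1, 1, -1] : List Int) 2 0 = -1 := by decide
theorem cell_ppp_0 : PySem.List.pyGetD ([1, 1, 1] : List Int) 0 0 = 1 := by decide
theorem cell_ppp_1 : PySem.List.pyGetD ([1, 1, 1] : List Int) 1 0 = 1 := by decide
theorem cell_ppp_2 : PySem.List.pyGetD ([1, 1, 1] : List Int) 2 0 = 1 := by decide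

theorem range8 : PySem.List.pyRange 0 8 1 = [0,1,2,3,4,5,6,7] := by decide

-- ===== VERDICT (by name: the statement is the Claim_ definition above) =====
theorem calculate_spec : Claim_equal_calculate := by
  intro koefs _ _
  unfold Spec_calculate calculate_alt calculate
  simp only [table_eval]
  rw [evalAll_eight]
  simp only [List.length_cons, List.length_nil,
    show ((0:Nat)+1+1+1+1+1+1+1+1) = 8 from rfl, Nat.cast_ofNat, range8]
  simp only [List.foldl_cons, List.foldl_nil, List.nil_append, List.cons_append,
    rowL0, rowL1, rowL2, rowL3, rowL4, rowL5, rowL6, rowL7, cell_mmm_0, cell_mmm_1, cell_mmm_2, cell_mmp_0, cell_mmp_1, cell_mmp_2, cell_mpm_0, cell_mpm_1, cell_mpm_2, cell_mpp_0, cell_mpp_1, cell_mpp_2, cell_pmm_0, cell_pmm_1, cell_pmm_2, cell_pmp_0, cell_pmp_1, cell_pmp_2, cell_ppm_0, cell_ppm_1, cell_ppm_2, cell_ppp_0, cell_ppp_1, cell_ppp_2]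
  simp only [List.cons.injEq, and_true]
  and_intros <;> ring
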